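-- pv_equiv track=rewrite | github.com/spencerpeters/BackDoorExperiment | oldCode/jsonTest.py | reformatR
-- ===== SOURCE A (Python) =====
-- def reformatR(x):
--     y = []
--     for ta in x:
--         treatment = ta[0]
--         adjustments = ta[1]
--         adjustmentsList = [adj for adj in adjustments.values()]
--         y.append([treatment, adjustmentsList])
--
--     # we want to map closures to lists of admissible treatments. The number of unique closures is what is relevant.
--     z = {}
--     for ta in y:
--         treatment = ta[0]
--         adjustments = ta[1]
--         for adj in adjustments:
--             closureList = (treatment + adj)
--             closureList.sort()
--             closure = tuple(closureList)
--             if (closure not in z):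
--                 z[closure] = [adj]
--             else:
--                 z[closure].append(adj)
--
--     return z
-- ===== SOURCE B (Python) =====
-- def reformatR(x):
--     # Flatten to (closure, adjustment) pairs, dedup keys in first-occurrence
--     # order, then build each group by filtering the flat pair list.
--     pairs = [(tuple(sorted(t + a)), a)
--              for t, d in x
--              for a in d.values()]
--     keys = list(dict.fromkeys(k for k, _ in pairs))
--     return {k: [a for kk, a in pairs if kk == k] for k in keys}
-- ===== Notes on version B (the rewrite author's own statement) =====
-- stated objective: alternative
-- what changed: B abandons A's incremental dict accumulation: it flattens the input to a list of (closure, adjustment) pairs, dedups the closure keys in first-occurrence order via dict.fromkeys, and builds each group by filtering the flat pair list per key.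
import Mathlib
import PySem

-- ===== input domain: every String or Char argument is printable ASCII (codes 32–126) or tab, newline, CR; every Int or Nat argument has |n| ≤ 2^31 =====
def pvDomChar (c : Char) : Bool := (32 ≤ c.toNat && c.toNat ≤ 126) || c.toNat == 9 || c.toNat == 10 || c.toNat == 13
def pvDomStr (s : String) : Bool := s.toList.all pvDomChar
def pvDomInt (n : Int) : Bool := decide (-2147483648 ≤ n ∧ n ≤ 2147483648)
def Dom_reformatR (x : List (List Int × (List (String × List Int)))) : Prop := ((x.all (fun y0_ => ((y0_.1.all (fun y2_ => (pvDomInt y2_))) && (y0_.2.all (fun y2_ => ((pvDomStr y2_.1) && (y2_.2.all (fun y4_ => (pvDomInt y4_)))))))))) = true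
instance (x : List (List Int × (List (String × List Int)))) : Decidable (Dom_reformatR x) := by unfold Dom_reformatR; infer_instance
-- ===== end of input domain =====

-- B replaces A's incremental dict-grouping by flatten-to-(closure,adj)-pairs, first-occurrence key dedup, and a per-key filter; same return value, no speed claim.

-- ===== PORT A =====
-- A's two passes: first build y = [(treatment, list(adjustments.values()))], then group into z incrementally.
def reformatR (x : List (List Int × (List (String × List Int)))) : List (List Int × List (List Int)) :=
  let y : List (List Int × List (List Int)) :=
    x.foldl (fun y ta =>
      let treatment := ta.1
      let adjustments := ta.2
      -- adjustments.values(): the values of the dict in insertion order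
      let adjustmentsList := adjustments.map (fun p => p.2)
      y ++ [(treatment, adjustmentsList)]) []
  let z : PySem.Dict (List Int) (List (List Int)) :=
    y.foldl (fun z ta =>
      let treatment := ta.1
      let adjustments := ta.2
      adjustments.foldl (fun z adj =>
        -- closureList = treatment + adj; closureList.sort(); closure = tuple(closureList)
        let closure := PySem.List.sorted (treatment ++ adj) (fun v => v) false
        if z.contains closure = false then
          z.insert closure [adj]
        else
          z.modify closure [] (fun l => l ++ [adj])) z) PySem.Dict.empty
  z.items

-- ===== PORT B =====
-- Source B: flat pairs comprehension, dict.fromkeys dedup of the keys, then a filtering comprehension per key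
def reformatR_alt (x : List (List Int × (List (String × List Int)))) : List (List Int × List (List Int)) :=
  let pairs : List (List Int × List Int) :=
    x.flatMap (fun ta =>
      ta.2.map (fun p => (PySem.List.sorted (ta.1 ++ p.2) (fun v => v) false, p.2)))
  let keys : List (List Int) := PySem.List.dedup (pairs.map (fun q => q.1))
  keys.map (fun k => (k, (pairs.filter (fun q => q.1 == k)).map (fun q => q.2)))

-- ===== PRECONDITION & SPEC =====
def Spec_reformatR (x : List (List Int × (List (String × List Int)))) (out : List (List Int × List (List Int))) : Prop := out = reformatR_alt x
instance (x : List (List Int × (List (String × List Int)))) (out : List (List Int × List (List Int))) : Decidable (Spec_reformatR x out) := by unfold Spec_reformatR; infer_instance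

-- ===== CLAIM =====
def Claim_equal_reformatR : Prop := ∀ (x : List (List Int × (List (String × List Int)))), Dom_reformatR x → Spec_reformatR x (reformatR x)

-- ===== LEMMAS AND PROOFS =====

-- A's if/else update is exactly a modify-with-default step, on any dict.
theorem pv_step_eq (z : PySem.Dict (List Int) (List (List Int))) (c adj : List Int) :
    (if z.contains c = false then z.insert c [adj] else z.modify c [] (fun l => l ++ [adj]))
      = z.modify c [] (fun l => l ++ [adj]) := by
  by_cases h : z.contains c = true
  · simp [h]
  · have h' : z.contains c = false := by simpa using h
    simp [h', PySem.Dict.modify, PySem.Dict.getD_of_not_contains z ([] : List (List Int)) h']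

-- A's first pass builds exactly the map of (treatment, values).
theorem pv_y_eq (x : List (List Int × (List (String × List Int))))
    (acc : List (List Int × List (List Int))) :
    x.foldl (fun y ta => y ++ [(ta.1, ta.2.map (fun p => p.2))]) acc
      = acc ++ x.map (fun ta => (ta.1, ta.2.map (fun p => p.2))) := by
  induction x generalizing acc with
  | nil => simp
  | cons h t ih => simp [List.foldl_cons, ih]

-- A's dict z is the modify-append fold over B's flat pair list.
theorem pv_z_eq (x : List (List Int × (List (String × List Int)))) :
    (x.map (fun ta => (ta.1, ta.2.map (fun p => p.2)))).foldl (fun z ta =>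
        ta.2.foldl (fun z adj =>
          if z.contains (PySem.List.sorted (ta.1 ++ adj) (fun v => v) false) = false then
            z.insert (PySem.List.sorted (ta.1 ++ adj) (fun v => v) false) [adj]
          else
            z.modify (PySem.List.sorted (ta.1 ++ adj) (fun v => v) false) [] (fun l => l ++ [adj])) z)
      (PySem.Dict.empty : PySem.Dict (List Int) (List (List Int)))
      = (x.flatMap (fun ta =>
            ta.2.map (fun p => (PySem.List.sorted (ta.1 ++ p.2) (fun v => v) false, p.2)))).foldl
          (fun z p => z.modify p.1 [] (fun l => l ++ [p.2])) PySem.Dict.empty := by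
  rw [List.foldl_flatMap, List.foldl_map]
  apply PySem.List.foldl_congr_mem
  intro z ta _
  simp only [List.foldl_map]
  apply PySem.List.foldl_congr_mem
  intro acc p _
  simpa using pv_step_eq acc _ p.2

theorem reformatR_spec : Claim_equal_reformatR := by
  intro x _
  unfold Spec_reformatR
  simp only [reformatR, reformatR_alt]
  rw [pv_y_eq, List.nil_append, pv_z_eq]
  set pairs : List (List Int × List Int) :=
    x.flatMap (fun ta =>
      ta.2.map (fun p => (PySem.List.sorted (ta.1 ++ p.2) (fun v => v) false, p.2))) with hpairs
  have hnd : (pairs.foldl (fun z p => z.modify p.1 [] (fun l => l ++ [p.2]))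
      (PySem.Dict.empty : PySem.Dict (List Int) (List (List Int)))).keys.Nodup :=
    PySem.Dict.nodup_keys_foldl_modify_key pairs (fun p => p.1) []
      (fun _ p l => l ++ [p.2]) PySem.Dict.empty (by simp)
  rw [PySem.Dict.items_eq_map_keys _ hnd []]
  rw [PySem.Dict.keys_foldl_modify_key pairs (fun p => p.1) [] (fun _ p l => l ++ [p.2])]
  have hkeys : PySem.Set.update (PySem.Dict.empty :
      PySem.Dict (List Int) (List (List Int))).keys (pairs.map (fun p => p.1))
      = PySem.List.dedup (pairs.map (fun q => q.1)) := by
    simp [PySem.Dict.keys_empty, PySem.Set.update_nil_left]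
  rw [hkeys]
  apply List.map_congr_left
  intro k _
  rw [PySem.Dict.getD_foldl_modify_append pairs PySem.Dict.empty k]
  simp [PySem.Dict.getD_empty]

-- ===== VERDICT =====
-- (the theorem reformatR_spec above names Claim_equal_reformatR)
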